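-- pv_equiv track=rewrite | github.com/phatakshaunak/scaler_academy | DSA_Problem_Solving/Bit_Manipulation/strange_equality.py | solve
-- ===== SOURCE A (Python) =====
-- def solve(A):
--
--     '''
--     Sum of two numbers is expressed as (A+B) = A^B + 2*(A&B)
--     We need (A+B) = A^B ; i.e. we need A&B to be zero. For the smallest number greater than A, we can consider the smallest power of 2
--     greater than A. In this way, all the bits of A will be unset as the MSB of a power of 2 is 1 and all others are unset.
--     Similarly, the greatest number smaller than A, will be the complement of A. Here we can't simply select a smaller power of 2 as
--     the MSB of A may be set. A complement will flip all bits and thus return 0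
--     Ex. 5 -- 101  ; 7 -- 111
--     '''
--
--     # To get the higher power of 2 for A, we can calculate its bit size, add 1 to it and get 2's power.
--     # To calculate complement, again use number of bits, iterate over the number and unset set bits and vice versa.
--
--     def bit_size(n):
--         count = 0
--         while n:
--             count += 1
--             n = n >> 1
--         return count
--
--     max_bits = bit_size(A)
--
--     Y = (1<<(max_bits))
--
--     X = 0
--     i = 0
--     while A:
--         if not A&1:
--             X = X + (1<<i)
--         A = A >> 1
--         i += 1
--
--     return X^Y
-- ===== SOURCE B (Python) =====
-- def solve(A):
--     m = A.bit_length()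
--     return ((1 << (m + 1)) - 1) ^ A
-- ===== Notes on version B (the rewrite author's own statement) =====
-- stated objective: simpler
-- what changed: Replaces the two while-loops (bit counting and bit-by-bit complement building) with a closed form: XOR A with the all-ones mask (1<<(bit_length+1))-1, since complementing within bit_length and XORing with the next power of two fold into one mask.
-- outside the precondition, e.g. on solve(-1): A does not finish within the time limit, B returns -4
import Mathlib
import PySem

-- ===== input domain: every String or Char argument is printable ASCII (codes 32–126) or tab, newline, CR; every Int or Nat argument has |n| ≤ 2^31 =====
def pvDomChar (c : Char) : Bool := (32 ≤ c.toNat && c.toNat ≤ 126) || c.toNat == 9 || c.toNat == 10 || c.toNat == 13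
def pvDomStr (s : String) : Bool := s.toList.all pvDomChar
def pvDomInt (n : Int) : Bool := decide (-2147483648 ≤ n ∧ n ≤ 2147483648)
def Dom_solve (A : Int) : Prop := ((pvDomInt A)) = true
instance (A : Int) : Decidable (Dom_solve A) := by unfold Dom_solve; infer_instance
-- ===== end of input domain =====

-- B replaces A's two bit-by-bit while-loops by the closed form ((1 << (bit_length A + 1)) - 1) ^ A (simpler, same result).


-- ===== PORT A =====
-- inner helper bit_size: while n: count += 1; n = n >> 1   (fuel = |n|+1 suffices for n ≥ 0)
def bitSizeGo : Nat → Int → Int → Int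
  | 0, _, count => count
  | fuel+1, n, count => if n ≠ 0 then bitSizeGo fuel (n >>> 1) (count + 1) else count

-- the X-loop: while A: if not A&1: X = X + (1<<i); A = A >> 1; i += 1   (i kept as the Nat shift amount)
def solveLoop : Nat → Int → Int → Nat → Int
  | 0, _, X, _ => X
  | fuel+1, A, X, i =>
      if A ≠ 0 then
        solveLoop fuel (A >>> 1) (if PySem.Int.band A 1 = 0 then X + ((1 : Int) <<< i) else X) (i + 1)
      else X

def solve (A : Int) : Int :=
  let max_bits := bitSizeGo (A.natAbs + 1) A 0
  let Y : Int := (1 : Int) <<< max_bits.toNat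
  let X : Int := solveLoop (A.natAbs + 1) A 0 0
  PySem.Int.bxor X Y

-- ===== PORT B =====
def solve_alt (A : Int) : Int :=
  let m := PySem.Int.bitLength A
  PySem.Int.bxor (((1 : Int) <<< (m + 1)) - 1) A

-- ===== PRECONDITION & SPEC =====
-- Pre_ excludes negative A, on which Python A's while-loops never terminate (A >> 1 of a negative stays -1).
def Pre_solve (A : Int) : Prop := 0 ≤ A
instance (A : Int) : Decidable (Pre_solve A) := by unfold Pre_solve; infer_instance
def pvWitness_solve : Int := (5)
def Spec_solve (A : Int) (out : Int) : Prop := out = solve_alt A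
instance (A : Int) (out : Int) : Decidable (Spec_solve A out) := by unfold Spec_solve; infer_instance

-- ===== CLAIM (what is proved, stated in full; the proofs are below) =====
def Claim_equal_solve : Prop := ∀ (A : Int), Dom_solve A → Pre_solve A → Spec_solve A (solve A)

-- ===== LEMMAS AND PROOFS =====

theorem natCast_shiftRight_one (a : Nat) : ((a : Int) >>> (1 : Int)) = ((a / 2 : Nat) : Int) := by
  rw [show (1 : Int) = ((1 : Nat) : Int) from rfl, Int.shiftRight_natCast_right,
    show ((a : Int) >>> (1 : Nat)) = ((a >>> 1 : Nat) : Int) from (Int.natCast_shiftRight a 1).symm,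
    Nat.shiftRight_one]

theorem band_one_natCast (a : Nat) : PySem.Int.band (a : Int) 1 = ((a % 2 : Nat) : Int) := by
  rw [show ((1 : Int)) = ((1 : Nat) : Int) from rfl, PySem.Int.band_natCast]
  simp [Nat.and_one_is_mod]

theorem one_shiftLeft_int (n : Nat) : ((1 : Int) <<< n) = ((2 ^ n : Nat) : Int) := by
  rw [show ((1 : Int)) = ((1 : Nat) : Int) from rfl, ← Int.natCast_shiftLeft, Nat.one_shiftLeft]

-- bit_size computes the bit length
theorem bitSizeGo_eq (a : Nat) : ∀ (fuel : Nat) (c : Int), a < fuel →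
    bitSizeGo fuel (a : Int) c = c + (PySem.Int.bitLength (a : Int) : Int) := by
  induction a using Nat.strong_induction_on with
  | _ a ih =>
    intro fuel c hfuel
    match fuel, hfuel with
    | fuel+1, hfuel =>
      rcases Nat.eq_zero_or_pos a with rfl | ha
      · simp [bitSizeGo]
      · have hne : ((a : Int)) ≠ 0 := Int.natCast_ne_zero.mpr (by omega)
        rw [bitSizeGo, if_pos hne, natCast_shiftRight_one,
          ih (a / 2) (Nat.div_lt_self ha (by norm_num)) fuel (c + 1) (by omega),
          PySem.Int.bitLength_natCast ha]
        push_cast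
        ring

-- loop invariant for the complement loop, stated over Int arithmetic
theorem solveLoop_eq (a : Nat) : ∀ (fuel : Nat) (X : Int) (i : Nat), a < fuel →
    solveLoop fuel (a : Int) X i
      = X + (2 : Int) ^ i * ((2 : Int) ^ (PySem.Int.bitLength (a : Int)) - 1 - (a : Int)) := by
  induction a using Nat.strong_induction_on with
  | _ a ih =>
    intro fuel X i hfuel
    match fuel, hfuel with
    | fuel+1, hfuel =>
      rcases Nat.eq_zero_or_pos a with rfl | ha
      · simp [solveLoop]
      · have hne : ((a : Int)) ≠ 0 := Int.natCast_ne_zero.mpr (by omega)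
        rw [solveLoop, if_pos hne, natCast_shiftRight_one, band_one_natCast,
          ih (a / 2) (Nat.div_lt_self ha (by norm_num)) fuel _ (i + 1) (by omega),
          PySem.Int.bitLength_natCast ha]
        have hdecomp : (a : Int) = 2 * ((a / 2 : Nat) : Int) + ((a % 2 : Nat) : Int) := by
          push_cast; omega
        rw [one_shiftLeft_int i]
        rcases Nat.mod_two_eq_zero_or_one a with h2 | h2 <;>
          simp only [h2, Nat.cast_zero, Nat.cast_one] at hdecomp ⊢ <;>
          (first | simp only [if_true] | skip) <;>
          rw [hdecomp, pow_succ] <;> push_cast <;> ring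

-- Nat xor facts
theorem xor_two_pow_of_lt : ∀ (n : Nat) {x : Nat}, x < 2 ^ n → x ^^^ 2 ^ n = 2 ^ n + x := by
  intro n
  induction n with
  | zero => intro x hx; interval_cases x; decide
  | succ n ih =>
    intro x hx
    have hb := Nat.bit_bodd_div2 x
    have hps : (2 : Nat) ^ (n + 1) = 2 * 2 ^ n := by ring
    have h2 : (2 : Nat) ^ (n + 1) = Nat.bit false (2 ^ n) := by simp [Nat.bit_val]; ring
    have hd : x.div2 < 2 ^ n := by
      rw [Nat.div2_val]; omega
    calc x ^^^ 2 ^ (n+1) = Nat.bit x.bodd x.div2 ^^^ Nat.bit false (2 ^ n) := by rw [hb, h2]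
      _ = Nat.bit (bne x.bodd false) (x.div2 ^^^ 2 ^ n) := Nat.xor_bit ..
      _ = Nat.bit x.bodd (2 ^ n + x.div2) := by rw [ih hd]; simp
      _ = 2 ^ (n+1) + x := by
          have hx2 := Nat.bodd_add_div2 x
          simp only [Nat.bit_val]
          omega

theorem two_pow_sub_one_xor : ∀ (n : Nat) {a : Nat}, a < 2 ^ n → (2 ^ n - 1) ^^^ a = 2 ^ n - 1 - a := by
  intro n
  induction n with
  | zero => intro a ha; interval_cases a; decide
  | succ n ih =>
    intro a ha
    have hb := Nat.bit_bodd_div2 a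
    have hps : (2 : Nat) ^ (n + 1) = 2 * 2 ^ n := by ring
    have hone : (1 : Nat) ≤ 2 ^ n := Nat.one_le_two_pow
    have h2 : (2 : Nat) ^ (n + 1) - 1 = Nat.bit true (2 ^ n - 1) := by
      simp only [Nat.bit_val, Bool.toNat_true]
      omega
    have hd : a.div2 < 2 ^ n := by rw [Nat.div2_val]; omega
    calc (2 ^ (n+1) - 1) ^^^ a = Nat.bit true (2 ^ n - 1) ^^^ Nat.bit a.bodd a.div2 := by rw [hb, h2]
      _ = Nat.bit (bne true a.bodd) ((2 ^ n - 1) ^^^ a.div2) := Nat.xor_bit ..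
      _ = Nat.bit (!a.bodd) (2 ^ n - 1 - a.div2) := by rw [ih hd]; cases a.bodd <;> rfl
      _ = 2 ^ (n+1) - 1 - a := by
          have ha2 := Nat.bodd_add_div2 a
          cases hob : a.bodd <;>
            simp only [hob, Nat.bit_val, Bool.toNat_true, Bool.toNat_false, Bool.not_true,
              Bool.not_false] at ha2 ⊢ <;> omega

-- ===== VERDICT (by name: the statement is the Claim_ definition above) =====
theorem solve_spec : Claim_equal_solve := by
  unfold Claim_equal_solve Spec_solve Pre_solve
  intro A _ hA
  lift A to ℕ using hA with a
  set L := PySem.Int.bitLength (a : Int) with hL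
  have haL : a < 2 ^ L := by
    have := PySem.Int.lt_two_pow_bitLength (a : Int)
    simpa [← hL] using this
  have hLL : a < 2 ^ (L + 1) := by
    have : (2 : Nat) ^ (L + 1) = 2 * 2 ^ L := by ring
    omega
  have hnatAbs : ((a : Int)).natAbs = a := Int.natAbs_natCast a
  have hp : ∀ k : Nat, ((2 ^ k : Nat) : Int) = (2 : Int) ^ k := by intro k; push_cast; ring
  -- port B evaluates to the mask closed form
  have halt : solve_alt (a : Int) = ((2 ^ (L + 1) - 1 - a : Nat) : Int) := by
    show PySem.Int.bxor (((1 : Int) <<< (L + 1)) - 1) (a : Int) = _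
    have hm : ((1 : Int) <<< (L + 1)) - 1 = ((2 ^ (L + 1) - 1 : Nat) : Int) := by
      rw [one_shiftLeft_int (L + 1)]
      have : (1 : Nat) ≤ 2 ^ (L + 1) := Nat.one_le_two_pow
      push_cast [this]
      ring
    rw [hm, PySem.Int.bxor_natCast, two_pow_sub_one_xor (L + 1) hLL]
  -- port A evaluates to the same value
  have hY : bitSizeGo ((a : Int)).natAbs.succ (a : Int) 0 = (L : Int) := by
    rw [hnatAbs, bitSizeGo_eq a (a + 1) 0 (by omega)]
    simp [← hL]
  have hloop : solveLoop ((a : Int)).natAbs.succ (a : Int) 0 0 = ((2 ^ L - 1 - a : Nat) : Int) := by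
    rw [hnatAbs, solveLoop_eq a (a + 1) 0 0 (by omega), ← hL, ← hp L]
    simp only [pow_zero, one_mul, zero_add]
    omega
  show PySem.Int.bxor (solveLoop ((a : Int)).natAbs.succ (a : Int) 0 0)
      ((1 : Int) <<< (bitSizeGo ((a : Int)).natAbs.succ (a : Int) 0).toNat) = solve_alt (a : Int)
  rw [hY, hloop, halt, Int.toNat_natCast, one_shiftLeft_int L, PySem.Int.bxor_natCast,
    xor_two_pow_of_lt L (by omega)]
  congr 1
  have : (2 : Nat) ^ (L + 1) = 2 * 2 ^ L := by ring
  omega
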